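-- pv_equiv track=rewrite | github.com/Aasthaengg/IBMdataset | Python_codes/p03593/s230514916.py | count
-- ===== SOURCE A (Python) =====
-- def count(ctr):
--     odd = 0
--     two = 0
--     four = 0
--     for n in ctr:
--         if n == 0: continue
--         if n % 2 == 1: odd += 1
--         elif n % 4 == 0: four += 1
--         elif n % 2 == 0:
--             two += 1
--             if n >= 4:
--                 four += 1
--     return odd, two, four
-- ===== SOURCE B (Python) =====
-- def count(ctr):
--     odd = sum(1 for n in ctr if n % 2 == 1)
--     two = sum(1 for n in ctr if n % 4 == 2)
--     four = sum(1 for n in ctr if n % 4 == 0 and n != 0) + sum(1 for n in ctr if n % 4 == 2 and n >= 4)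
--     return odd, two, four
-- ===== Notes on version B (the rewrite author's own statement) =====
-- stated objective: alternative
-- what changed: Replaces the single interleaved loop with a branching if/elif cascade and a shared mutable accumulator triple by three independent filtered counts (one predicate per bucket), with the four-bucket expressed as two disjoint counts (multiples of 4 except 0, plus numbers ≡4 mod-wise ≡2 and ≥4).
import Mathlib
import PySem

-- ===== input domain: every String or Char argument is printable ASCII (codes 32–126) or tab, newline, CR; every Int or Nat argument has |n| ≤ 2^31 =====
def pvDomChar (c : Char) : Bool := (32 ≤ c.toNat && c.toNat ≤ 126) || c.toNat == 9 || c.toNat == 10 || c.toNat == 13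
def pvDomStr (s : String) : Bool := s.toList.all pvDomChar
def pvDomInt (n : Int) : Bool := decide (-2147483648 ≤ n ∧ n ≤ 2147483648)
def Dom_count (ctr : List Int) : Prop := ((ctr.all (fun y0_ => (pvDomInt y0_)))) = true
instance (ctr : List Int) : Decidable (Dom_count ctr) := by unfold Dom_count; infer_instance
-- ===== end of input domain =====

-- B replaces A's single interleaved loop (if/elif cascade over one shared accumulator
-- triple) with three independent filtered counts, one predicate per bucket (objective: alternative).

-- ===== PORT A =====
-- one pass, branching cascade updating the triple (odd, two, four)
def countStep (s : Int × Int × Int) (n : Int) : Int × Int × Int :=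
  if n = 0 then s
  else if PySem.Int.mod n 2 = 1 then (s.1 + 1, s.2.1, s.2.2)
  else if PySem.Int.mod n 4 = 0 then (s.1, s.2.1, s.2.2 + 1)
  else if PySem.Int.mod n 2 = 0 then
    if n ≥ 4 then (s.1, s.2.1 + 1, s.2.2 + 1) else (s.1, s.2.1 + 1, s.2.2)
  else s

def count (ctr : List Int) : Int × Int × Int :=
  ctr.foldl countStep (0, 0, 0)

-- ===== PORT B =====
-- three independent filtered counts (sum over a generator ↦ countP)
def count_alt (ctr : List Int) : Int × Int × Int :=
  ((ctr.countP (fun n => PySem.Int.mod n 2 == 1) : Int),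
   (ctr.countP (fun n => PySem.Int.mod n 4 == 2) : Int),
   (ctr.countP (fun n => PySem.Int.mod n 4 == 0 && n != 0) : Int)
     + (ctr.countP (fun n => PySem.Int.mod n 4 == 2 && n ≥ 4) : Int))

-- ===== PRECONDITION & SPEC =====
def Spec_count (ctr : List Int) (out : Int × Int × Int) : Prop := out = count_alt ctr
instance (ctr : List Int) (out : Int × Int × Int) : Decidable (Spec_count ctr out) := by unfold Spec_count; infer_instance

-- ===== CLAIM (what is proved, stated in full; the proofs are below) =====
def Claim_equal_count : Prop := ∀ (ctr : List Int), Dom_count ctr → Spec_count ctr (count ctr)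

-- ===== LEMMAS AND PROOFS =====

lemma countStep_eq (s : Int × Int × Int) (n : Int) :
    countStep s n =
      (s.1 + (if PySem.Int.mod n 2 == 1 then (1:Int) else 0),
       s.2.1 + (if PySem.Int.mod n 4 == 2 then (1:Int) else 0),
       s.2.2 + (if PySem.Int.mod n 4 == 0 && n != 0 then (1:Int) else 0)
         + (if PySem.Int.mod n 4 == 2 && decide (n ≥ 4) then (1:Int) else 0)) := by
  obtain ⟨a, b, c⟩ := s
  have h2 : PySem.Int.mod n 2 = n % 2 := PySem.Int.mod_eq_emod_of_pos (by norm_num)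
  have h4 : PySem.Int.mod n 4 = n % 4 := PySem.Int.mod_eq_emod_of_pos (by norm_num)
  simp only [countStep, h2, h4, Bool.and_eq_true, beq_iff_eq, bne_iff_ne, ne_eq,
    decide_eq_true_eq, ge_iff_le]
  split_ifs <;> simp only [Prod.mk.injEq] <;> refine ⟨?_, ?_, ?_⟩ <;> first | trivial | omega

lemma count_foldl (ctr : List Int) : ∀ s : Int × Int × Int,
    ctr.foldl countStep s =
      (s.1 + (ctr.countP (fun n => PySem.Int.mod n 2 == 1) : Int),
       s.2.1 + (ctr.countP (fun n => PySem.Int.mod n 4 == 2) : Int),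
       s.2.2 + (ctr.countP (fun n => PySem.Int.mod n 4 == 0 && n != 0) : Int)
         + (ctr.countP (fun n => PySem.Int.mod n 4 == 2 && n ≥ 4) : Int)) := by
  induction ctr with
  | nil => intro s; simp
  | cons n t ih =>
    intro s
    simp only [List.foldl_cons, List.countP_cons, ih, countStep_eq]
    obtain ⟨a, b, c⟩ := s
    simp only [Prod.mk.injEq]
    refine ⟨?_, ?_, ?_⟩ <;> split_ifs <;> push_cast <;> omega

-- ===== VERDICT (by name: the statement is the Claim_ definition above) =====
theorem count_spec : Claim_equal_count := by
  intro ctr _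
  unfold Spec_count count count_alt
  rw [count_foldl]
  simp
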